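-- pv_equiv track=rewrite | github.com/ndronen/spelling | spelling/preprocess.py | add_nonces_to_word
-- ===== SOURCE A (Python) =====
-- def add_nonces_to_word(word, nonce_chars, nonce_interval):
--     if nonce_interval < 1:
--         return word
--
--     n_nonces = len(nonce_chars)
--     # Split the word into nonce_interval-1 sized subsequences.
--     split = [word[j:j+nonce_interval] for j in range(0, len(word), nonce_interval)]
--     accum = []
--     # Append a unique nonce character to each split.
--     for k,s in enumerate(split):
--         if k < len(split)-1:
--             s = s + nonce_chars[k]
--         accum.append(s)
--     word = ''.join(accum)
--
--     return word
-- ===== SOURCE B (Python) =====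
-- def add_nonces_to_word(word, nonce_chars, nonce_interval):
--     # Single pass over the characters; no chunk list is materialized.
--     if nonce_interval < 1:
--         return word
--     buf = []
--     n = len(word)
--     for i, c in enumerate(word):
--         buf.append(c)
--         if (i + 1) % nonce_interval == 0 and i + 1 < n:
--             buf.append(nonce_chars[i // nonce_interval])
--     return ''.join(buf)
-- ===== Notes on version B (the rewrite author's own statement) =====
-- stated objective: simpler
-- what changed: Replaces the slice-into-chunks list plus enumerate-and-join loop with one direct pass over the characters that appends a nonce character after every nonce_interval-th position (except the last), never materializing the chunk list.
import Mathlib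
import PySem

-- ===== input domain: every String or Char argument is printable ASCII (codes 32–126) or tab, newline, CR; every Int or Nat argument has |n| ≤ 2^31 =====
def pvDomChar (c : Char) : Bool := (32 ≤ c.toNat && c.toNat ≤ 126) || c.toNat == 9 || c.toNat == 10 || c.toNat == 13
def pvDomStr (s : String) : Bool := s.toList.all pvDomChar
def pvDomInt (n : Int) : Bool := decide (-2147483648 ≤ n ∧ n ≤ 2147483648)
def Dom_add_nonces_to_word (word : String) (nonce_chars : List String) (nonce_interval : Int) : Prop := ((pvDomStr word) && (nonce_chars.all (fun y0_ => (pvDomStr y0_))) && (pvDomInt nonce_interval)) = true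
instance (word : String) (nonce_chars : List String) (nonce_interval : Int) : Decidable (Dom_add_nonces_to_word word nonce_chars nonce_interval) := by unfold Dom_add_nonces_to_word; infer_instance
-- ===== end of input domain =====

-- B replaces A's slice-into-chunks + enumerate-and-join with one direct pass over the
-- characters (objective: simpler); equivalence is about the return value only.

-- ===== PORT A =====
def add_nonces_to_word (word : String) (nonce_chars : List String) (nonce_interval : Int) : String :=
  if nonce_interval < 1 then word
  else
    let cs := word.toList
    -- (n_nonces = len(nonce_chars) is computed by A but never used)
    -- split = [word[j:j+nonce_interval] for j in range(0, len(word), nonce_interval)]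
    let split := (PySem.List.pyRange 0 (cs.length : Int) nonce_interval).map
      (fun j => PySem.List.slice cs (some j) (some (j + nonce_interval)))
    -- for k, s in enumerate(split): if k < len(split)-1: s = s + nonce_chars[k]; accum.append(s)
    -- (nonce_chars[k] raises IndexError out of range: excluded by Pre_, pyGetD default "")
    let accum := (PySem.List.enumerate split).foldl
      (fun acc ks =>
        acc ++ [if ks.1 < (split.length : Int) - 1
                then ks.2 ++ (PySem.List.pyGetD nonce_chars ks.1 "").toList
                else ks.2]) []
    -- word = ''.join(accum)  (join with empty separator = flatten, exact)
    String.mk accum.flatten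

-- ===== PORT B =====
def add_nonces_to_word_alt (word : String) (nonce_chars : List String) (nonce_interval : Int) : String :=
  if nonce_interval < 1 then word
  else
    let cs := word.toList
    let n := (cs.length : Int)
    -- for i, c in enumerate(word): buf.append(c); if (i+1) % nonce_interval == 0 and i+1 < n: buf.append(nonce_chars[i // nonce_interval])
    let buf := (PySem.List.enumerate cs).foldl
      (fun acc ic =>
        (acc ++ [ic.2]) ++
          (if PySem.Int.mod (ic.1 + 1) nonce_interval = 0 ∧ ic.1 + 1 < n
           then (PySem.List.pyGetD nonce_chars (PySem.Int.floordiv ic.1 nonce_interval) "").toList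
           else []))
      []
    -- ''.join(buf)
    String.mk buf

-- ===== PRECONDITION & SPEC =====
-- Pre_ excludes exactly the inputs where both Pythons raise IndexError: nonce_interval ≥ 1
-- and the word splits into more than len(nonce_chars) + 1 chunks.
def Pre_add_nonces_to_word (word : String) (nonce_chars : List String) (nonce_interval : Int) : Prop :=
  nonce_interval < 1 ∨
    (word.toList.length + nonce_interval.toNat - 1) / nonce_interval.toNat ≤ nonce_chars.length + 1
instance (word : String) (nonce_chars : List String) (nonce_interval : Int) : Decidable (Pre_add_nonces_to_word word nonce_chars nonce_interval) := by unfold Pre_add_nonces_to_word; infer_instance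
def pvWitness_add_nonces_to_word : String × List String × Int := ("abcd", (["X", "Y"], 2))

def Spec_add_nonces_to_word (word : String) (nonce_chars : List String) (nonce_interval : Int) (out : String) : Prop := out = add_nonces_to_word_alt word nonce_chars nonce_interval
instance (word : String) (nonce_chars : List String) (nonce_interval : Int) (out : String) : Decidable (Spec_add_nonces_to_word word nonce_chars nonce_interval out) := by unfold Spec_add_nonces_to_word; infer_instance

-- ===== CLAIM (what is proved, stated in full; the proofs are below) =====
def Claim_equal_add_nonces_to_word : Prop := ∀ (word : String) (nonce_chars : List String) (nonce_interval : Int), Dom_add_nonces_to_word word nonce_chars nonce_interval → Pre_add_nonces_to_word word nonce_chars nonce_interval → Spec_add_nonces_to_word word nonce_chars nonce_interval (add_nonces_to_word word nonce_chars nonce_interval)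

-- ===== LEMMAS AND PROOFS =====

-- the (possibly defaulted) nonce string for chunk q, as a char list
def nonceL (nc : List String) (q : Nat) : List Char := (nc.getD q "").toList

-- common recursive form: emit one chunk of m chars, then the nonce, then recurse
def chunkGo (nc : List String) (m : Nat) (q : Nat) (cs : List Char) : List Char :=
  if h : cs.length ≤ m ∨ m = 0 then cs
  else cs.take m ++ nonceL nc q ++ chunkGo nc m (q + 1) (cs.drop m)
termination_by cs.length
decreasing_by
  simp only [not_or] at h
  simp only [List.length_drop]
  omega

-- B's loop as structural recursion over the characters
def charGo (nc : List String) (m L : Nat) : Nat → List Char → List Char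
  | _, [] => []
  | i, c :: cs =>
      c :: ((if (i + 1) % m = 0 ∧ i + 1 < L then nonceL nc (i / m) else [])
            ++ charGo nc m L (i + 1) cs)

theorem modEquiv (i m : ℕ) : (PySem.Int.mod ((i:ℤ)+1) (m:ℤ) = 0) = ((i+1) % m = 0) := by
  have h : ((i:ℤ)+1).fmod (m:ℤ) = ((i:ℤ)+1) % (m:ℤ) := by
    rw [Int.fmod_eq_emod]; simp
  rw [PySem.Int.mod, h]
  have h2 : ((i:ℤ)+1) % (m:ℤ) = (((i+1) % m : ℕ) : ℤ) := by push_cast; ring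
  rw [h2]
  simp only [Int.natCast_eq_zero]

theorem fdivEquiv (i m : ℕ) : PySem.Int.floordiv (i:ℤ) (m:ℤ) = ((i/m : ℕ) : ℤ) := by
  simp [PySem.Int.floordiv, Int.fdiv_eq_ediv]

-- B's foldl equals charGo
theorem B_fold (nc : List String) (m L : Nat) :
    ∀ (cs : List Char) (i : Nat) (acc : List Char),
      (PySem.List.enumerate cs (i:Int)).foldl
        (fun acc ic =>
          (acc ++ [ic.2]) ++
            (if PySem.Int.mod (ic.1 + 1) (m:Int) = 0 ∧ ic.1 + 1 < (L:Int)
             then (PySem.List.pyGetD nc (PySem.Int.floordiv ic.1 (m:Int)) "").toList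
             else [])) acc
      = acc ++ charGo nc m L i cs := by
  intro cs
  induction cs with
  | nil => intro i acc; simp [PySem.List.enumerate_nil, charGo]
  | cons c cs ih =>
    intro i acc
    rw [PySem.List.enumerate_cons, List.foldl_cons]
    have hcast : ((i:ℤ) + 1) = ((i + 1 : ℕ) : ℤ) := by push_cast; ring
    have hcond : (PySem.Int.mod ((i:ℤ) + 1) (m:Int) = 0 ∧ (i:ℤ) + 1 < (L:Int))
        = ((i + 1) % m = 0 ∧ i + 1 < L) := by
      rw [modEquiv]
      have : ((i:ℤ) + 1 < (L:Int)) = (i + 1 < L) := by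
        simp only [eq_iff_iff]; omega
      rw [this]
    simp only [hcond, fdivEquiv, PySem.List.pyGetD_natCast]
    rw [hcast, ih (i+1)]
    simp only [charGo, nonceL]
    split <;> simp

-- charGo within a chunk: position q*m + r with r < m
theorem char_chunk (nc : List String) (m : Nat) (hm : 0 < m) :
    ∀ (cs : List Char) (q r : Nat), r < m →
      charGo nc m (q*m + r + cs.length) (q*m + r) cs =
        if cs.length ≤ m - r then cs
        else cs.take (m - r) ++ nonceL nc q ++ chunkGo nc m (q + 1) (cs.drop (m - r)) := by
  intro cs
  induction cs with
  | nil =>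
    intro q r hr
    simp [charGo]
  | cons c cs ih =>
    intro q r hr
    simp only [charGo, List.length_cons]
    by_cases hrm : r + 1 < m
    · -- not at a chunk boundary: no nonce
      have hmod : ¬ ((q*m + r + 1) % m = 0 ∧ q*m + r + 1 < q*m + r + (cs.length + 1)) := by
        intro ⟨h1, _⟩
        have : (q*m + r + 1) % m = (r + 1) % m := by
          conv_lhs => rw [show q*m + r + 1 = (r+1) + q*m by ring]
          simp [Nat.add_mul_mod_self_right]
        rw [this, Nat.mod_eq_of_lt hrm] at h1
        omega
      rw [if_neg hmod]
      have harg1 : q*m + r + (cs.length + 1) = q*m + (r+1) + cs.length := by ring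
      have harg2 : q*m + r + 1 = q*m + (r+1) := by ring
      rw [harg1, harg2, ih q (r+1) hrm]
      by_cases hlen : cs.length + 1 ≤ m - r
      · rw [if_pos hlen, if_pos (by omega)]
        simp
      · rw [if_neg hlen, if_neg (by omega)]
        have htk : (c :: cs).take (m - r) = c :: cs.take (m - (r+1)) := by
          rw [show m - r = (m - (r+1)) + 1 by omega]
          simp
        have hdp : (c :: cs).drop (m - r) = cs.drop (m - (r+1)) := by
          rw [show m - r = (m - (r+1)) + 1 by omega]
          simp
        rw [htk, hdp]
        simp
    · -- r + 1 = m : chunk boundary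
      have hrm1 : r + 1 = m := by omega
      have hqm : (q+1)*m = q*m + m := by ring
      rcases cs with _ | ⟨c', cs'⟩
      · -- last character of the word: i+1 < L fails
        rw [if_neg (by simp)]
        rw [if_pos (by simp; omega)]
        simp [charGo]
      · -- boundary inside the word: nonce q fires
        have hmod : ((q*m + r + 1) % m = 0 ∧ q*m + r + 1 < q*m + r + ((c' :: cs').length + 1)) := by
          constructor
          · rw [show q*m + r + 1 = (q+1)*m by omega]
            simp [Nat.mul_mod_left]
          · simp
        rw [if_pos hmod]
        have hdiv : (q*m + r) / m = q := by
          rw [show q*m + r = r + m*q by ring, Nat.add_mul_div_left _ _ hm,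
              Nat.div_eq_of_lt (by omega : r < m)]
          omega
        rw [hdiv]
        have harg1 : q*m + r + ((c' :: cs').length + 1) = (q+1)*m + 0 + (c' :: cs').length := by
          simp only [List.length_cons]; omega
        have harg2 : q*m + r + 1 = (q+1)*m + 0 := by omega
        rw [harg1, harg2, ih (q+1) 0 hm]
        have hrhs : (if (c' :: cs').length ≤ m - 0 then c' :: cs'
            else List.take (m - 0) (c' :: cs') ++ nonceL nc (q+1) ++
              chunkGo nc m (q+1+1) (List.drop (m - 0) (c' :: cs')))
            = chunkGo nc m (q+1) (c' :: cs') := by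
          by_cases hlen : (c' :: cs').length ≤ m
          · rw [if_pos (by simpa using hlen)]
            conv_rhs => rw [chunkGo]
            rw [dif_pos (Or.inl hlen)]
          · rw [if_neg (by simpa using hlen)]
            conv_rhs => rw [chunkGo]
            rw [dif_neg (by simp only [not_or]; exact ⟨by omega, by omega⟩)]
            simp
        rw [hrhs]
        have hsub : m - r = 1 := by omega
        rw [hsub]
        rw [if_neg (by simp)]
        simp

-- A's chunk list in closed form
def Achunks (m : Nat) (cs : List Char) : List (List Char) :=
  (PySem.List.pyRange 0 (cs.length : Int) (m:Int)).map
    (fun j => PySem.List.slice cs (some j) (some (j + (m:Int))))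

theorem Achunks_eq (m : Nat) (hm : 0 < m) (cs : List Char) :
    Achunks m cs = (List.range ((cs.length + m - 1) / m)).map
      (fun k => (cs.drop (k*m)).take m) := by
  unfold Achunks
  rw [PySem.List.pyRange_of_pos _ _ (by exact_mod_cast hm)]
  rw [List.map_map]
  have hcnt : (if (0:ℤ) < (cs.length : Int) then (((cs.length : Int) - 0 + m - 1) / m).toNat else 0)
      = (cs.length + m - 1) / m := by
    by_cases h : 0 < cs.length
    · rw [if_pos (by exact_mod_cast h)]
      have : ((cs.length : Int) - 0 + m - 1) = ((cs.length + m - 1 : ℕ) : ℤ) := by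
        omega
      rw [this]
      norm_cast
    · rw [if_neg (by omega)]
      have : cs.length = 0 := by omega
      rw [this]
      rw [Nat.div_eq_of_lt (by omega)]
  rw [hcnt]
  apply List.map_congr_left
  intro k _
  have : ((0:ℤ) + (m:ℤ) * (k:ℤ)) = ((k*m : ℕ) : ℤ) := by push_cast; ring
  simp only [Function.comp, this]
  exact PySem.List.slice_natCast_add cs (k*m) m

theorem Achunks_nil (m : Nat) (hm : 0 < m) : Achunks m [] = [] := by
  rw [Achunks_eq m hm]
  simp [Nat.div_eq_of_lt (by omega : m - 1 < m)]

theorem Achunks_cons (m : Nat) (hm : 0 < m) (cs : List Char) (h : cs ≠ []) :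
    Achunks m cs = cs.take m :: Achunks m (cs.drop m) := by
  rw [Achunks_eq m hm, Achunks_eq m hm]
  have hL : 0 < cs.length := List.length_pos_iff.mpr h
  have hcnt : (cs.length + m - 1) / m = ((cs.drop m).length + m - 1) / m + 1 := by
    simp only [List.length_drop]
    by_cases hle : cs.length ≤ m
    · rw [show cs.length - m = 0 by omega,
          show cs.length + m - 1 = (cs.length - 1) + m by omega,
          Nat.add_div_right _ hm, Nat.div_eq_of_lt (by omega), Nat.div_eq_of_lt (by omega)]
    · rw [show cs.length + m - 1 = (cs.length - m + m - 1) + m by omega,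
          Nat.add_div_right _ hm]
  rw [hcnt, List.range_succ_eq_map, List.map_cons, List.map_map]
  congr 1
  · simp
  · apply List.map_congr_left
    intro k _
    simp only [Function.comp, Nat.succ_eq_add_one]
    rw [List.drop_drop]
    congr 2
    ring

-- A's flatten-of-enumerated-chunks equals chunkGo
theorem A_go (nc : List String) (m : Nat) (hm : 0 < m) :
    ∀ (n : Nat) (cs : List Char), cs.length = n → ∀ (q : Nat),
      ((PySem.List.enumerate (Achunks m cs) (q:Int)).map
        (fun ks => if ks.1 < (q:Int) + ((Achunks m cs).length : Int) - 1
                   then ks.2 ++ (PySem.List.pyGetD nc ks.1 "").toList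
                   else ks.2)).flatten
      = chunkGo nc m q cs := by
  intro n
  induction n using Nat.strong_induction_on with
  | _ n ih =>
    intro cs hlen q
    by_cases hcs : cs = []
    · subst hcs
      rw [Achunks_nil m hm]
      rw [chunkGo]
      simp [PySem.List.enumerate_nil]
    · rw [Achunks_cons m hm cs hcs]
      rw [PySem.List.enumerate_cons, List.map_cons, List.flatten_cons]
      by_cases hle : cs.length ≤ m
      · -- single chunk: drop is empty
        have hdrop : cs.drop m = [] := by
          rw [List.drop_eq_nil_iff]; omega
        rw [hdrop, Achunks_nil m hm]
        rw [if_neg (by simp)]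
        rw [List.take_of_length_le hle]
        rw [chunkGo, dif_pos (Or.inl hle)]
        simp [PySem.List.enumerate_nil]
      · -- more than one chunk
        have hdropne : cs.drop m ≠ [] := by
          simp only [ne_eq, List.drop_eq_nil_iff]
          omega
        obtain ⟨len', hlen'⟩ : ∃ len', (Achunks m (cs.drop m)).length = len' + 1 := by
          rw [Achunks_cons m hm _ hdropne]
          exact ⟨_, rfl⟩
        simp only [List.length_cons, hlen']
        rw [if_pos (by push_cast; omega)]
        rw [PySem.List.pyGetD_natCast]
        have hcast : ((q:ℤ) + 1) = ((q + 1 : ℕ) : ℤ) := by push_cast; ring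
        have hcond : ∀ ks : ℤ × List Char,
            (ks.1 < (q:Int) + ((len' + 1 + 1 : ℕ) : Int) - 1)
            = (ks.1 < ((q+1 : ℕ):Int) + (((Achunks m (cs.drop m)).length : ℕ) : Int) - 1) := by
          intro ks
          rw [hlen']
          simp only [eq_iff_iff]
          push_cast
          omega
        simp only [hcast, hcond]
        rw [ih (cs.length - m) (by omega) (cs.drop m) (by simp) (q+1)]
        conv_rhs => rw [chunkGo]
        rw [dif_neg (by simp only [not_or]; exact ⟨by omega, by omega⟩)]
        simp [nonceL, List.append_assoc]

-- charGo at chunk start equals chunkGo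
theorem charGo_eq_chunkGo (nc : List String) (m : Nat) (hm : 0 < m) (cs : List Char) :
    charGo nc m cs.length 0 cs = chunkGo nc m 0 cs := by
  have h := char_chunk nc m hm cs 0 0 hm
  simp only [Nat.zero_mul, Nat.zero_add, Nat.sub_zero] at h
  rw [h]
  conv_rhs => rw [chunkGo]
  by_cases hle : cs.length ≤ m
  · rw [if_pos hle, dif_pos (Or.inl hle)]
  · rw [if_neg hle, dif_neg (by simp only [not_or]; exact ⟨by omega, by omega⟩)]

-- ===== VERDICT (by name: the statement is the Claim_ definition above) =====
theorem add_nonces_to_word_spec : Claim_equal_add_nonces_to_word := by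
  intro word nc ni _ _
  unfold Spec_add_nonces_to_word add_nonces_to_word add_nonces_to_word_alt
  by_cases hlt : ni < 1
  · rw [if_pos hlt, if_pos hlt]
  · rw [if_neg hlt, if_neg hlt]
    have hni : ni = ((ni.toNat : ℕ) : ℤ) := by omega
    set m := ni.toNat with hmdef
    have hm : 0 < m := by omega
    rw [hni]
    simp only []
    -- A side
    rw [PySem.List.foldl_append_singleton_eq_map]
    rw [List.nil_append]
    have hA : (PySem.List.pyRange 0 ((word.toList.length : ℕ) : ℤ) ((m:ℕ):ℤ)).map
        (fun j => PySem.List.slice word.toList (some j) (some (j + ((m:ℕ):ℤ))))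
        = Achunks m word.toList := rfl
    rw [hA]
    have hAgo := A_go nc m hm word.toList.length word.toList rfl 0
    simp only [Nat.cast_zero, zero_add] at hAgo
    rw [hAgo]
    -- B side
    have hB := B_fold nc m word.toList.length word.toList 0 []
    simp only [Nat.cast_zero, List.nil_append] at hB
    rw [hB]
    rw [charGo_eq_chunkGo nc m hm]
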